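-- pv_equiv track=rewrite | github.com/matrxi999/Program_analysis_brainfuck | GTPtranspilerOptimiez.py | optimize_pointers
-- ===== SOURCE A (Python) =====
-- def optimize_pointers(sourcecode):
--     """Combine consecutive < and > operations."""
--     new_code = []
--     count = 0
--
--     for char in sourcecode:
--         if char in ['<', '>']:
--             count = count + 1 if char == '>' else count - 1
--         else:
--             if count:
--                 new_code.append(('>'*abs(count) if count > 0 else '<'*abs(count)))
--                 count = 0
--             new_code.append(char)
--
--     if count:  # Append any remaining counts
--         new_code.append(('>'*abs(count) if count > 0 else '<'*abs(count)))
--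
--     return ''.join(new_code)
-- ===== SOURCE B (Python) =====
-- def optimize_pointers(sourcecode):
--     """Combine consecutive < and > operations (divide and conquer).
--
--     Optimize each half recursively, then merge: the trailing pointer run of
--     the left result and the leading pointer run of the right result meet at
--     the seam and are replaced by their combined net movement.
--     """
--     def merge(l, r):
--         k = len(l)
--         while k > 0 and l[k - 1] in '<>':
--             k -= 1
--         j = 0
--         while j < len(r) and r[j] in '<>':
--             j += 1
--         seam = l[k:] + r[:j]
--         net = seam.count('>') - seam.count('<')
--         return l[:k] + ('>' * net if net > 0 else '<' * (-net)) + r[j:]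
--
--     def go(s):
--         if len(s) <= 1:
--             return s
--         m = len(s) // 2
--         return merge(go(s[:m]), go(s[m:]))
--
--     return go(sourcecode)
-- ===== Notes on version B (the rewrite author's own statement) =====
-- stated objective: alternative
-- what changed: Replaces A's single linear pass with a pending counter by a divide-and-conquer: each half of the string is optimized recursively and the two optimized halves are merged by collapsing the pointer runs that meet at the seam into their net movement; no running counter exists anywhere.
import Mathlib
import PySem

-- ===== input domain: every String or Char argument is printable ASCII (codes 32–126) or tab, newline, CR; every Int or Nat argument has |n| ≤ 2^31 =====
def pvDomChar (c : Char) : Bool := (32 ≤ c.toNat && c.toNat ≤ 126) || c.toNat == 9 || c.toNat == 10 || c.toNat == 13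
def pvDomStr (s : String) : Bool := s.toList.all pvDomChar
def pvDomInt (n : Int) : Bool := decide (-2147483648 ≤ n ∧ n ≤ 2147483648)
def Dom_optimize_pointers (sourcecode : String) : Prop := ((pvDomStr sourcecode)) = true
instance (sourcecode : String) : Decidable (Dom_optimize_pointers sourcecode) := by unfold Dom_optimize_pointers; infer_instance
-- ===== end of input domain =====

-- B replaces A's single linear pass with a pending counter by divide and conquer: each half
-- is optimized recursively and the results are merged by collapsing the seam's pointer runs
-- into their net movement; an alternative algorithm, not claimed faster.

-- ===== PORT A =====
-- literal port of A; ''.join over the accumulated list is concatenation (flatten),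
-- '>'*abs(count) is List.replicate count.natAbs '>'
def optimize_pointers (sourcecode : String) : String :=
  let r := sourcecode.toList.foldl
    (fun (st : List (List Char) × Int) (char : Char) =>
      if char = '<' ∨ char = '>' then
        (st.1, if char = '>' then st.2 + 1 else st.2 - 1)
      else
        let new_code := if st.2 ≠ 0 then
            st.1 ++ [if st.2 > 0 then List.replicate st.2.natAbs '>'
                     else List.replicate st.2.natAbs '<']
          else st.1
        (new_code ++ [[char]], 0))
    ([], 0)
  let new_code := if r.2 ≠ 0 then
      r.1 ++ [if r.2 > 0 then List.replicate r.2.natAbs '>'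
              else List.replicate r.2.natAbs '<']
    else r.1
  String.mk new_code.flatten

-- ===== PORT B =====
-- `c in '<>'`
def pvPtr (c : Char) : Bool := c == '<' || c == '>'

-- seam.count('>') - seam.count('<')
def pvNet (l : List Char) : Int := (l.count '>' : Int) - (l.count '<' : Int)

-- '>'*net if net>0 else '<'*(-net)
def pvE (net : Int) : List Char :=
  if net > 0 then List.replicate net.natAbs '>' else List.replicate net.natAbs '<'

-- Source B's merge: the two while-loops scanning the trailing run of l and the leading run of r
-- are the takeWhile/dropWhile over l.reverse and over r; then the seam is re-emitted as pvE
def pvMerge (l r : List Char) : List Char :=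
  (l.reverse.dropWhile pvPtr).reverse                                  -- l[:k]
    ++ pvE (pvNet ((l.reverse.takeWhile pvPtr).reverse                 -- seam = l[k:] + r[:j]
                    ++ r.takeWhile pvPtr))
    ++ r.dropWhile pvPtr                                               -- r[j:]

-- Source B's go: split at the midpoint, recurse, merge
def pvGo (s : List Char) : List Char :=
  if _h : s.length ≤ 1 then s
  else
    let m := s.length / 2
    pvMerge (pvGo (s.take m)) (pvGo (s.drop m))
termination_by s.length
decreasing_by
  · simp only [List.length_take]; omega
  · simp only [List.length_drop]; omega

def optimize_pointers_alt (sourcecode : String) : String :=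
  String.mk (pvGo sourcecode.toList)

-- ===== PRECONDITION & SPEC =====
def Spec_optimize_pointers (sourcecode : String) (out : String) : Prop := out = optimize_pointers_alt sourcecode
instance (sourcecode : String) (out : String) : Decidable (Spec_optimize_pointers sourcecode out) := by unfold Spec_optimize_pointers; infer_instance

-- ===== CLAIM (what is proved, stated in full; the proofs are below) =====
def Claim_equal_optimize_pointers : Prop := ∀ (sourcecode : String), Dom_optimize_pointers sourcecode → Spec_optimize_pointers sourcecode (optimize_pointers sourcecode)

-- ===== LEMMAS AND PROOFS =====

-- the common semantics: the rest of A's output given the pending count and remaining input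
def pvG : Int → List Char → List Char
  | count, [] => pvE count
  | count, c :: cs =>
      if pvPtr c then pvG (if c == '>' then count + 1 else count - 1) cs
      else pvE count ++ c :: pvG 0 cs

theorem pvE_zero : pvE 0 = [] := by simp [pvE]

-- A's fold equals pvG
theorem aside (cs : List Char) : ∀ (acc : List (List Char)) (count : Int),
    (let r := cs.foldl
      (fun (st : List (List Char) × Int) (char : Char) =>
        if char = '<' ∨ char = '>' then
          (st.1, if char = '>' then st.2 + 1 else st.2 - 1)
        else
          let new_code := if st.2 ≠ 0 then
              st.1 ++ [if st.2 > 0 then List.replicate st.2.natAbs '>'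
                       else List.replicate st.2.natAbs '<']
            else st.1
          (new_code ++ [[char]], 0))
      (acc, count)
     (if r.2 ≠ 0 then
        r.1 ++ [if r.2 > 0 then List.replicate r.2.natAbs '>'
                else List.replicate r.2.natAbs '<']
      else r.1).flatten) = acc.flatten ++ pvG count cs := by
  induction cs with
  | nil =>
    intro acc count
    by_cases h : count = 0
    · simp [pvG, pvE, h]
    · simp [pvG, pvE, h]
  | cons c cs ih =>
    intro acc count
    by_cases hp : c = '<' ∨ c = '>'
    · have hp' : pvPtr c = true := by
        rcases hp with h | h <;> simp [pvPtr, h]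
      simp only [List.foldl_cons, if_pos hp]
      rw [ih]
      have : pvG count (c :: cs) = pvG (if c == '>' then count + 1 else count - 1) cs := by
        simp [pvG, hp']
      rw [this]
      simp
    · have hp' : pvPtr c = false := by
        simp only [pvPtr, Bool.or_eq_false_iff, beq_eq_false_iff_ne]
        exact ⟨fun h => hp (Or.inl h), fun h => hp (Or.inr h)⟩
      simp only [List.foldl_cons, if_neg hp]
      rw [ih]
      have hg : pvG count (c :: cs) = pvE count ++ c :: pvG 0 cs := by
        simp [pvG, hp']
      rw [hg]
      by_cases h0 : count = 0
      · simp [h0, pvE_zero]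
      · simp [h0, pvE]

theorem allPtr_pvE (n : Int) : ∀ x ∈ pvE n, pvPtr x = true := by
  intro x hx
  unfold pvE at hx
  split at hx <;> simp_all [List.eq_of_mem_replicate hx, pvPtr]

theorem pvNet_pvE (n : Int) : pvNet (pvE n) = n := by
  unfold pvNet pvE
  split_ifs with h
  · simp [List.count_replicate]; omega
  · have habs : (n.natAbs : Int) = -n := Int.ofNat_natAbs_of_nonpos (by omega)
    simp [List.count_replicate, habs]

theorem pvNet_append (a b : List Char) : pvNet (a ++ b) = pvNet a + pvNet b := by
  simp [pvNet, List.count_append]; omega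

theorem takeWhile_all {p : Char → Bool} {l : List Char} (h : ∀ x ∈ l, p x = true) :
    l.takeWhile p = l ∧ l.dropWhile p = [] := by
  induction l with
  | nil => simp
  | cons c cs ih =>
    have hc := h c (by simp)
    have := ih (fun x hx => h x (by simp [hx]))
    simp [List.takeWhile, List.dropWhile, hc, this.1, this.2]

theorem takeWhile_append_all {p : Char → Bool} {u : List Char} (v : List Char)
    (h : ∀ x ∈ u, p x = true) :
    (u ++ v).takeWhile p = u ++ v.takeWhile p ∧ (u ++ v).dropWhile p = v.dropWhile p := by
  induction u with
  | nil => simp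
  | cons c cs ih =>
    have hc := h c (by simp)
    have := ih (fun x hx => h x (by simp [hx]))
    simp [hc, this.1, this.2]

theorem takeWhile_append_stop {p : Char → Bool} {c : Char} (u v : List Char)
    (h : p c = false) :
    (u ++ c :: v).takeWhile p = u.takeWhile p ∧
    (u ++ c :: v).dropWhile p = u.dropWhile p ++ c :: v := by
  induction u with
  | nil => simp [List.takeWhile, List.dropWhile, h]
  | cons d ds ih =>
    by_cases hd : p d
    · simp [List.takeWhile, List.dropWhile, hd, ih.1, ih.2]
    · simp [List.takeWhile, List.dropWhile, hd]

-- the part of A's output after the leading pointer run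
def pvCore (s : List Char) : List Char :=
  match s.dropWhile pvPtr with
  | [] => []
  | c :: cs => c :: pvG 0 cs

theorem pvCore_not_ptr (s : List Char) :
    (pvCore s).takeWhile pvPtr = [] ∧ (pvCore s).dropWhile pvPtr = pvCore s := by
  unfold pvCore
  match h : s.dropWhile pvPtr with
  | [] => simp
  | c :: cs =>
    have hc : pvPtr c = false := by
      have := List.head_dropWhile_not pvPtr (l := s) (by simp [h])
      simpa [h] using this
    simp [List.takeWhile, List.dropWhile, hc]

-- SPLIT: pvG count s = leading-run emission ++ core
theorem pvG_split : ∀ (s : List Char) (count : Int),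
    pvG count s = pvE (count + pvNet (s.takeWhile pvPtr)) ++ pvCore s := by
  intro s
  induction s with
  | nil => intro count; simp [pvG, pvCore, pvNet]
  | cons c cs ih =>
    intro count
    by_cases hp : pvPtr c
    · have hd : pvNet [c] = (if c == '>' then (1:Int) else -1) := by
        rcases (by simpa [pvPtr] using hp : c = '<' ∨ c = '>') with h | h <;>
          simp [h, pvNet]
      rw [show pvG count (c :: cs) = pvG (if c == '>' then count + 1 else count - 1) cs by
            simp [pvG, hp]]
      rw [ih]
      have ht : (c :: cs).takeWhile pvPtr = c :: cs.takeWhile pvPtr := by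
        simp [List.takeWhile, hp]
      have hdrop : (c :: cs).dropWhile pvPtr = cs.dropWhile pvPtr := by
        simp [List.dropWhile, hp]
      rw [ht, show pvNet (c :: cs.takeWhile pvPtr) = pvNet [c] + pvNet (cs.takeWhile pvPtr) by
            simpa using pvNet_append [c] (cs.takeWhile pvPtr)]
      rw [hd]
      have : pvCore (c :: cs) = pvCore cs := by unfold pvCore; rw [hdrop]
      rw [this]
      congr 1
      split <;> ring_nf
    · rw [show pvG count (c :: cs) = pvE count ++ c :: pvG 0 cs by simp [pvG, hp]]
      have ht : (c :: cs).takeWhile pvPtr = [] := by simp [List.takeWhile, hp]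
      have hdrop : (c :: cs).dropWhile pvPtr = c :: cs := by simp [List.dropWhile, hp]
      have : pvCore (c :: cs) = c :: pvG 0 cs := by unfold pvCore; rw [hdrop]
      rw [ht, this]
      simp [pvNet]

theorem pvE_reverse (n : Int) : (pvE n).reverse = pvE n := by
  unfold pvE; split <;> simp [List.reverse_replicate]

-- merging when the left argument is a pure emission
theorem pvMerge_pvE (n : Int) (b : List Char) :
    pvMerge (pvE n) (pvG 0 b) = pvG n b := by
  unfold pvMerge
  have hall := takeWhile_all (p := pvPtr) (l := pvE n) (allPtr_pvE n)
  rw [pvE_reverse, hall.1, hall.2, pvE_reverse]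
  rw [pvG_split b 0, pvG_split b n]
  have hlead := takeWhile_append_all (p := pvPtr) (u := pvE (0 + pvNet (b.takeWhile pvPtr)))
      (pvCore b) (allPtr_pvE _)
  rw [hlead.1, hlead.2, (pvCore_not_ptr b).1, (pvCore_not_ptr b).2]
  rw [List.append_nil, pvNet_append, pvNet_pvE, pvNet_pvE]
  simp [List.reverse_nil]

-- merging distributes over a non-pointer character in the left argument
theorem pvMerge_cons (u v r : List Char) (c : Char) (hc : pvPtr c = false) :
    pvMerge (u ++ c :: v) r = u ++ c :: pvMerge v r := by
  unfold pvMerge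
  have hrev : (u ++ c :: v).reverse = v.reverse ++ c :: u.reverse := by simp
  have hstop := takeWhile_append_stop (p := pvPtr) v.reverse u.reverse (c := c) hc
  rw [hrev, hstop.1, hstop.2]
  simp [List.append_assoc]

-- HOM: merging the two optimized pieces optimizes the concatenation
theorem pvMerge_hom : ∀ (a : List Char) (count : Int) (b : List Char),
    pvMerge (pvG count a) (pvG 0 b) = pvG count (a ++ b) := by
  intro a
  induction a with
  | nil => intro count b; simpa [pvG] using pvMerge_pvE count b
  | cons c a' ih =>
    intro count b
    by_cases hp : pvPtr c
    · rw [show pvG count (c :: a') = pvG (if c == '>' then count + 1 else count - 1) a' by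
            simp [pvG, hp]]
      rw [show pvG count ((c :: a') ++ b)
            = pvG (if c == '>' then count + 1 else count - 1) (a' ++ b) by simp [pvG, hp]]
      exact ih _ b
    · rw [show pvG count (c :: a') = pvE count ++ c :: pvG 0 a' by simp [pvG, hp]]
      rw [show pvG count ((c :: a') ++ b) = pvE count ++ c :: pvG 0 (a' ++ b) by
            simp [pvG, hp]]
      rw [pvMerge_cons _ _ _ _ (by simpa using hp), ih 0 b]

theorem pvG_singleton (c : Char) : pvG 0 [c] = [c] := by
  by_cases h1 : c = '>'
  · simp [pvG, pvPtr, h1, pvE]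
  · by_cases h2 : c = '<'
    · simp [pvG, pvPtr, h2, pvE]
    · simp [pvG, pvPtr, h1, h2, pvE_zero]

theorem pvGo_eq_pvG : ∀ (n : Nat) (s : List Char), s.length ≤ n → pvGo s = pvG 0 s := by
  intro n
  induction n with
  | zero =>
    intro s h
    have : s = [] := List.eq_nil_of_length_eq_zero (Nat.le_zero.mp h)
    subst this
    simp [pvGo, pvG, pvE_zero]
  | succ n ih =>
    intro s h
    rw [pvGo]
    split
    · rename_i hle
      match s, hle with
      | [], _ => simp [pvG, pvE_zero]
      | [c], _ => exact (pvG_singleton c).symm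
    · rename_i hgt
      show pvMerge (pvGo (List.take (s.length / 2) s)) (pvGo (List.drop (s.length / 2) s))
            = pvG 0 s
      have h2 : 2 ≤ s.length := by omega
      have hta : (s.take (s.length / 2)).length ≤ n := by
        simp [List.length_take]; omega
      have hda : (s.drop (s.length / 2)).length ≤ n := by
        simp [List.length_drop]; omega
      rw [ih _ hta, ih _ hda, pvMerge_hom, List.take_append_drop]

-- ===== VERDICT (by name: the statement is the Claim_ definition above) =====
theorem optimize_pointers_spec : Claim_equal_optimize_pointers := by
  intro s _
  unfold Spec_optimize_pointers optimize_pointers optimize_pointers_alt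
  have h := aside s.toList [] 0
  rw [pvGo_eq_pvG s.toList.length s.toList le_rfl]
  exact congrArg String.mk (by rw [h]; simp)
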